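-- pv_equiv track=rewrite | github.com/jason-vallet/ised | ISEDApp/functions.py | sort_regions
-- ===== SOURCE A (Python) =====
-- def sort_regions(regions):
--
-- 	startTimes = []
-- 	for val in regions.values():
-- 		startTimes.append(val[0])
--
-- 	startTimes = list(set(startTimes))
-- 	startTimes = sorted(startTimes)
--
--
-- 	sorted_regions = {}
-- 	#print startTimes
-- 	for i, t in enumerate(startTimes):
-- 		for val in regions.values():
-- 			if t == val[0]:
-- 				sorted_regions[i] = val
--
-- 	return sorted_regions
-- ===== SOURCE B (Python) =====
-- def sort_regions(regions):
--     # one pass: start time -> last value with that start (matches A's overwrite-by-last)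
--     last = {}
--     for val in regions.values():
--         last[val[0]] = val
--     return {i: last[t] for i, t in enumerate(sorted(last))}
-- ===== Notes on version B (the rewrite author's own statement) =====
-- stated objective: faster
-- what changed: Replaces the nested scan (for every sorted unique start time, rescan all values) with a single pass building a start->last-value dict, then one sort of its keys and a direct index assignment.
import Mathlib
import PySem

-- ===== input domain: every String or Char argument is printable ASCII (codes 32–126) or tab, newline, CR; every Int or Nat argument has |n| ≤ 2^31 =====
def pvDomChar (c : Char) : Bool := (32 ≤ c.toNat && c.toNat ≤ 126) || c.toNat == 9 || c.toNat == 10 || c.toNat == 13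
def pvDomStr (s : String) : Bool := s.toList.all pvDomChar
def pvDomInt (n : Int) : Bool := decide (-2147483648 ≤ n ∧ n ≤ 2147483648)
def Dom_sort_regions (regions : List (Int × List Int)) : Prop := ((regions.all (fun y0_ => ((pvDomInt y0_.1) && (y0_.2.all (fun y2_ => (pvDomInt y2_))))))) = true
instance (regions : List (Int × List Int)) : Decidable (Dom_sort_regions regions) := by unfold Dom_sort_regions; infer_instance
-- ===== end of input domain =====

-- B replaces A's rescan-per-unique-start nested loops by one dict pass plus one key sort (objective: faster).

-- ===== PORT A =====
-- val[0] is ported as List.headI; exact on Pre_ (all dict values nonempty; Python raises IndexError otherwise).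
def sort_regions (regions : List (Int × List Int)) : List (Int × List Int) :=
  let vals := (PySem.Dict.ofList regions).values
  let startTimes := vals.foldl (fun acc v => acc ++ [v.headI]) ([] : List Int)
  let st := PySem.List.sorted (PySem.Set.ofList startTimes) (fun x => x) false
  let d := (PySem.List.enumerate st).foldl
      (fun d p => vals.foldl (fun d v => if p.2 == v.headI then d.insert p.1 v else d) d)
      (PySem.Dict.empty : PySem.Dict Int (List Int))
  d.items

-- ===== PORT B =====
def sort_regions_alt (regions : List (Int × List Int)) : List (Int × List Int) :=
  let last := (PySem.Dict.ofList regions).values.foldl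
      (fun d v => d.insert v.headI v) (PySem.Dict.empty : PySem.Dict Int (List Int))
  (PySem.List.enumerate (PySem.List.sorted last.keys (fun x => x) false)).map
      (fun p => (p.1, last.getD p.2 []))

-- ===== PRECONDITION & SPEC =====
-- Pre_ excludes exactly the inputs where the Python A raises IndexError: a dict value that is the empty list.
def Pre_sort_regions (regions : List (Int × List Int)) : Prop :=
  ((PySem.Dict.ofList regions).values.all (fun v => !v.isEmpty)) = true
instance (regions : List (Int × List Int)) : Decidable (Pre_sort_regions regions) := by unfold Pre_sort_regions; infer_instance
def pvWitness_sort_regions : (List (Int × List Int)) := [(1, [3, 1]), (2, [3, 2]), (3, [1, 9])]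

def Spec_sort_regions (regions : List (Int × List Int)) (out : List (Int × List Int)) : Prop := out = sort_regions_alt regions
instance (regions : List (Int × List Int)) (out : List (Int × List Int)) : Decidable (Spec_sort_regions regions out) := by unfold Spec_sort_regions; infer_instance

-- ===== CLAIM (what is proved, stated in full; the proofs are below) =====
def Claim_equal_sort_regions : Prop := ∀ (regions : List (Int × List Int)), Dom_sort_regions regions → Pre_sort_regions regions → Spec_sort_regions regions (sort_regions regions)

-- ===== LEMMAS AND PROOFS =====

-- A's startTimes accumulation is a map
theorem pv_foldl_append_map (l : List (List Int)) (acc : List Int) :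
    l.foldl (fun a v => a ++ [v.headI]) acc = acc ++ l.map List.headI := by
  induction l generalizing acc with
  | nil => simp
  | cons v vs ih => simp [List.foldl, ih]

-- A's inner loop over the values inserts (if anything) the LAST matching value at key i
theorem pv_innerA (t i : Int) (l : List (List Int)) :
    ∀ d : PySem.Dict Int (List Int),
    l.foldl (fun d v => if t == v.headI then d.insert i v else d) d =
    (match l.reverse.find? (fun v => v.headI == t) with
     | some w => d.insert i w
     | none => d) := by
  induction l with
  | nil => intro d; simp
  | cons v vs ih =>
    intro d
    simp only [List.foldl, List.reverse_cons, List.find?_append]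
    by_cases h : t = v.headI
    · have hb : (t == v.headI) = true := by simp [h]
      have hb' : (v.headI == t) = true := by simp [h]
      rw [hb]
      simp only [if_true]
      rw [ih]
      cases hf : vs.reverse.find? (fun v => v.headI == t) with
      | some w => simp [PySem.Dict.insert_insert_self]
      | none => simp [List.find?, hb']
    · have hb : (t == v.headI) = false := by simp [h]
      have hb' : (v.headI == t) = false := by simp [Ne.symm h]
      rw [hb]
      simp only [Bool.false_eq_true, if_false]
      rw [ih]
      cases hf : vs.reverse.find? (fun v => v.headI == t) with
      | some w => simp
      | none => simp [List.find?, hb']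

-- B's dict lookup returns the LAST value inserted at that start time
theorem pv_foldB_getD (l : List (List Int)) :
    ∀ (d : PySem.Dict Int (List Int)) (t : Int) (dflt : List Int),
    (l.foldl (fun d v => d.insert v.headI v) d).getD t dflt =
    (match l.reverse.find? (fun v => v.headI == t) with
     | some w => w
     | none => d.getD t dflt) := by
  induction l with
  | nil => intro d t dflt; simp
  | cons v vs ih =>
    intro d t dflt
    simp only [List.foldl, List.reverse_cons, List.find?_append]
    rw [ih]
    cases hf : vs.reverse.find? (fun v => v.headI == t) with
    | some w => simp
    | none =>
      by_cases h : v.headI = t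
      · have hb : (v.headI == t) = true := by simp [h]
        simp [List.find?, h]
      · have hb : (v.headI == t) = false := by simp [h]
        simp only [List.find?, hb, Option.none_or]
        rw [PySem.Dict.getD_insert]
        rw [if_neg (fun h' => h h'.symm)]

theorem pv_find?_some_of_mem {t : Int} {l : List (List Int)}
    (h : t ∈ l.map List.headI) :
    ∃ w, l.reverse.find? (fun v => v.headI == t) = some w := by
  obtain ⟨v, hv, hvt⟩ := List.mem_map.mp h
  have : (l.reverse.find? (fun v => v.headI == t)).isSome := by
    rw [List.find?_isSome]
    exact ⟨v, List.mem_reverse.mpr hv, by simp [hvt]⟩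
  exact Option.isSome_iff_exists.mp this

theorem pv_main (regions : List (Int × List Int)) :
    sort_regions regions = sort_regions_alt regions := by
  unfold sort_regions sort_regions_alt
  simp only [pv_foldl_append_map, List.nil_append]
  set vals := (PySem.Dict.ofList regions).values with hvals
  set last := vals.foldl (fun d v => d.insert v.headI v)
      (PySem.Dict.empty : PySem.Dict Int (List Int)) with hlast
  have hkeys : last.keys = PySem.Set.ofList (vals.map List.headI) := by
    rw [hlast, PySem.Dict.keys_foldl_insert_key, PySem.Dict.keys_empty,
      PySem.Set.update_nil_left]
  rw [hkeys]
  set st := PySem.List.sorted (PySem.Set.ofList (vals.map List.headI)) (fun x => x) false with hst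
  have hmemst : ∀ t ∈ st, t ∈ vals.map List.headI := by
    intro t ht
    have := (PySem.List.mem_sorted (xs := PySem.Set.ofList (vals.map List.headI))
      (key := fun x => x) (rev := false) (x := t)).mp (hst ▸ ht)
    exact (PySem.Set.mem_ofList _ _).mp this
  -- the A-side dict: every inner loop finds a match, so it is a fold of fresh inserts
  have hA : (PySem.List.enumerate st).foldl
      (fun d p => vals.foldl (fun d v => if p.2 == v.headI then d.insert p.1 v else d) d)
      (PySem.Dict.empty : PySem.Dict Int (List Int)) =
      (PySem.List.enumerate st).foldl
      (fun d p => d.insert p.1 ((vals.reverse.find? (fun v => v.headI == p.2)).getD []))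
      (PySem.Dict.empty : PySem.Dict Int (List Int)) := by
    apply PySem.List.foldl_congr_mem
    intro acc p hp
    have hps : p.2 ∈ st := by
      have : p.2 ∈ (PySem.List.enumerate st).map (fun q : Int × Int => q.2) :=
        List.mem_map.mpr ⟨p, hp, rfl⟩
      rwa [PySem.List.map_snd_enumerate] at this
    obtain ⟨w, hw⟩ := pv_find?_some_of_mem (hmemst _ hps)
    rw [pv_innerA, hw]
    simp
  rw [hA]
  have hfresh : ((PySem.List.enumerate st).foldl
      (fun d p => d.insert p.1 ((vals.reverse.find? (fun v => v.headI == p.2)).getD []))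
      (PySem.Dict.empty : PySem.Dict Int (List Int))).items =
      (PySem.Dict.empty : PySem.Dict Int (List Int)).items ++
      (PySem.List.enumerate st).map
        (fun p => (p.1, (vals.reverse.find? (fun v => v.headI == p.2)).getD [])) := by
    apply PySem.Dict.items_foldl_insert_fresh
    · intro a _; simp
    · have hpw : ((PySem.List.enumerate st).map (fun p => p.1)).Pairwise (· < ·) :=
        List.pairwise_map.mpr (PySem.List.pairwise_lt_enumerate st 0)
      exact List.Pairwise.imp (fun h => ne_of_lt h) hpw
  have hemp : (PySem.Dict.empty : PySem.Dict Int (List Int)).items = [] := rfl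
  rw [hfresh, hemp, List.nil_append]
  apply List.map_congr_left
  intro p hp
  have hps : p.2 ∈ st := by
    have : p.2 ∈ (PySem.List.enumerate st).map (fun q : Int × Int => q.2) :=
      List.mem_map.mpr ⟨p, hp, rfl⟩
    rwa [PySem.List.map_snd_enumerate] at this
  obtain ⟨w, hw⟩ := pv_find?_some_of_mem (hmemst _ hps)
  rw [pv_foldB_getD, hw]
  simp

-- ===== VERDICT (by name: the statement is the Claim_ definition above) =====
theorem sort_regions_spec : Claim_equal_sort_regions := by
  intro regions _ _
  unfold Spec_sort_regions
  exact pv_main regions
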